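-- pv_equiv track=rewrite | github.com/alan-turing-institute/grace | grace/evaluation/metrics.py | _find_matching_pairs
-- ===== SOURCE A (Python) =====
-- def _find_matching_pairs(
--     list_of_sets1: list[set[int]] | list[set[tuple[int]]],
--     list_of_sets2: list[set[int]] | list[set[tuple[int]]],
-- ) -> list[set[int]] | list[set[tuple[int]]]:
--     matching_pairs = []
--     for set1 in list_of_sets1:
--         for set2 in list_of_sets2:
--             if len(set1.intersection(set2)) > 0:
--                 matching_pairs.append((set1, set2))
--     return matching_pairs
-- ===== SOURCE B (Python) =====
-- def _find_matching_pairs(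
--     list_of_sets1: list[set[int]] | list[set[tuple[int]]],
--     list_of_sets2: list[set[int]] | list[set[tuple[int]]],
-- ) -> list[set[int]] | list[set[tuple[int]]]:
--     # Inverted index: element -> indices of the sets in list_of_sets2 containing it.
--     index = {}
--     for j, set2 in enumerate(list_of_sets2):
--         for x in set2:
--             index.setdefault(x, []).append(j)
--     matching_pairs = []
--     for set1 in list_of_sets1:
--         candidates = set()
--         for x in set1:
--             candidates.update(index.get(x, ()))
--         for j in sorted(candidates):
--             matching_pairs.append((set1, list_of_sets2[j]))
--     return matching_pairs
-- ===== Notes on version B (the rewrite author's own statement) =====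
-- stated objective: alternative
-- what changed: Replaced the all-pairs intersection scan with an inverted index element->set2-indices built once; each set1 gathers its candidate set2 indices from the index and emits them in sorted order, so non-matching pairs are never intersected.
import Mathlib
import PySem

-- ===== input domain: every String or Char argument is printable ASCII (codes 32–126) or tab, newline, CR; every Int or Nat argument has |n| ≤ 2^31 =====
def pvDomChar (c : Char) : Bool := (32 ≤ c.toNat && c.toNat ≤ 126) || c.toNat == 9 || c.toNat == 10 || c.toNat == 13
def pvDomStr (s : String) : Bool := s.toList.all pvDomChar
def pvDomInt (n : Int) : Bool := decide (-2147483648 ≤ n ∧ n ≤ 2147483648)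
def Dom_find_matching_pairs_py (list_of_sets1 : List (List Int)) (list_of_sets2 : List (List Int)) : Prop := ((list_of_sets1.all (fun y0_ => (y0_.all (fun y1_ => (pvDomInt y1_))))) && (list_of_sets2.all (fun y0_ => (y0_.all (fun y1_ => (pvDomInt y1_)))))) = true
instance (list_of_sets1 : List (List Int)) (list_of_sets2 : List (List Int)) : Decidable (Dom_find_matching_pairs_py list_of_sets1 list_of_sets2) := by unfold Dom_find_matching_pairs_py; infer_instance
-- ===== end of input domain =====

-- B replaces A's all-pairs intersection scan with an inverted index element → set2 indices (objective: alternative algorithm).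

-- ===== PORT A =====
def find_matching_pairs_py (list_of_sets1 : List (List Int)) (list_of_sets2 : List (List Int)) : List (List Int × List Int) :=
  list_of_sets1.foldl (fun matching_pairs set1 =>
    list_of_sets2.foldl (fun matching_pairs set2 =>
      if 0 < PySem.Set.len (PySem.Set.inter set1 set2) then matching_pairs ++ [(set1, set2)]
      else matching_pairs) matching_pairs) []

-- ===== PORT B =====
-- 'index.setdefault(x, []).append(j)' is 'modify x [] (· ++ [j])'; 'list_of_sets2[j]' is indexed with
-- pyGetD (the index j comes from enumerate(list_of_sets2), so it is always in range).
def find_matching_pairs_py_alt (list_of_sets1 : List (List Int)) (list_of_sets2 : List (List Int)) : List (List Int × List Int) :=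
  let index : PySem.Dict Int (List Int) :=
    (PySem.List.enumerate list_of_sets2).foldl (fun index p =>
      p.2.foldl (fun index x => index.modify x [] (· ++ [p.1])) index) PySem.Dict.empty
  list_of_sets1.foldl (fun matching_pairs set1 =>
    let candidates : PySem.Set Int :=
      set1.foldl (fun candidates x => PySem.Set.update candidates (index.getD x [])) PySem.Set.empty
    matching_pairs ++ (PySem.List.sorted candidates (fun j => j) false).map
      (fun j => (set1, PySem.List.pyGetD list_of_sets2 j []))) []

-- ===== PRECONDITION & SPEC =====
def Spec_find_matching_pairs_py (list_of_sets1 : List (List Int)) (list_of_sets2 : List (List Int)) (out : List (List Int × List Int)) : Prop := out = find_matching_pairs_py_alt list_of_sets1 list_of_sets2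
instance (list_of_sets1 : List (List Int)) (list_of_sets2 : List (List Int)) (out : List (List Int × List Int)) : Decidable (Spec_find_matching_pairs_py list_of_sets1 list_of_sets2 out) := by unfold Spec_find_matching_pairs_py; infer_instance

-- ===== CLAIM (what is proved, stated in full; the proofs are below) =====
def Claim_equal_find_matching_pairs_py : Prop := ∀ (list_of_sets1 : List (List Int)) (list_of_sets2 : List (List Int)), Dom_find_matching_pairs_py list_of_sets1 list_of_sets2 → Spec_find_matching_pairs_py list_of_sets1 list_of_sets2 (find_matching_pairs_py list_of_sets1 list_of_sets2)

-- ===== LEMMAS AND PROOFS =====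

-- the inner dict-building loop over one set2: membership in a posting list
theorem pv_mem_inner_fold (s : List Int) (d : PySem.Dict Int (List Int)) (i x j : Int) :
    j ∈ (s.foldl (fun d y => d.modify y [] (· ++ [i])) d).getD x []
      ↔ j ∈ d.getD x [] ∨ (x ∈ s ∧ j = i) := by
  induction s generalizing d with
  | nil => simp
  | cons y t ih =>
    simp only [List.foldl_cons, ih, PySem.Dict.getD_modify, List.mem_cons]
    by_cases hxy : x = y <;> · simp [hxy]; try tauto

-- the whole index-building loop: j is in the posting list of x iff some enumerated pair contains x
theorem pv_mem_index (l : List (Int × List Int)) (d : PySem.Dict Int (List Int)) (x j : Int) :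
    j ∈ (l.foldl (fun d p => p.2.foldl (fun d y => d.modify y [] (· ++ [p.1])) d) d).getD x []
      ↔ j ∈ d.getD x [] ∨ ∃ p ∈ l, x ∈ p.2 ∧ j = p.1 := by
  induction l generalizing d with
  | nil => simp
  | cons p t ih =>
    simp only [List.foldl_cons, ih, pv_mem_inner_fold, List.mem_cons]
    constructor
    · rintro ((h | ⟨h1, h2⟩) | ⟨q, hq, h⟩)
      · exact Or.inl h
      · exact Or.inr ⟨p, Or.inl rfl, h1, h2⟩
      · exact Or.inr ⟨q, Or.inr hq, h⟩
    · rintro (h | ⟨q, (rfl | hq), h⟩)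
      · exact Or.inl (Or.inl h)
      · exact Or.inl (Or.inr h)
      · exact Or.inr ⟨q, hq, h⟩

-- the candidate-gathering loop: membership
theorem pv_mem_cand (s1 : List Int) (idx : PySem.Dict Int (List Int)) (c : PySem.Set Int) (j : Int) :
    j ∈ s1.foldl (fun c x => PySem.Set.update c (idx.getD x [])) c
      ↔ j ∈ c ∨ ∃ x ∈ s1, j ∈ idx.getD x [] := by
  induction s1 generalizing c with
  | nil => simp
  | cons y t ih =>
    simp only [List.foldl_cons, ih, PySem.Set.mem_update, List.mem_cons]
    constructor
    · rintro ((h | h) | ⟨x, hx, h⟩)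
      · exact Or.inl h
      · exact Or.inr ⟨y, Or.inl rfl, h⟩
      · exact Or.inr ⟨x, Or.inr hx, h⟩
    · rintro (h | ⟨x, (rfl | hx), h⟩)
      · exact Or.inl (Or.inl h)
      · exact Or.inl (Or.inr h)
      · exact Or.inr ⟨x, hx, h⟩

-- the candidate-gathering loop: no duplicates
theorem pv_nodup_cand (s1 : List Int) (idx : PySem.Dict Int (List Int)) (c : PySem.Set Int)
    (hc : c.Nodup) :
    (s1.foldl (fun c x => PySem.Set.update c (idx.getD x [])) c).Nodup := by
  induction s1 generalizing c with
  | nil => exact hc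
  | cons y t ih => exact ih _ (PySem.Set.nodup_update _ _ hc)

-- A's test 'len(set1 & set2) > 0' is nonempty intersection
theorem pv_inter_pos (s1 s2 : List Int) :
    (0 < PySem.Set.len (PySem.Set.inter s1 s2)) ↔ ∃ x ∈ s1, x ∈ s2 := by
  simp [PySem.Set.len, PySem.Set.inter, List.length_pos_iff, List.eq_nil_iff_forall_not_mem]

-- per-set1 step: B's sorted candidate indices, mapped through list_of_sets2, are A's filtered scan
theorem pv_row_eq (l2 : List (List Int)) (s1 : List Int) :
    (PySem.List.sorted
        (s1.foldl (fun c x => PySem.Set.update c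
          (((PySem.List.enumerate l2).foldl (fun d p =>
              p.2.foldl (fun d y => d.modify y [] (· ++ [p.1])) d) PySem.Dict.empty).getD x []))
          PySem.Set.empty) (fun j => j) false).map
      (fun j => (s1, PySem.List.pyGetD l2 j []))
    = ((l2.filter (fun s2 => decide (0 < PySem.Set.len (PySem.Set.inter s1 s2)))).map
        (fun s2 => (s1, s2))) := by
  set cand := (s1.foldl (fun c x => PySem.Set.update c
          (((PySem.List.enumerate l2).foldl (fun d p =>
              p.2.foldl (fun d y => d.modify y [] (· ++ [p.1])) d) PySem.Dict.empty).getD x []))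
          PySem.Set.empty) with hcand
  set ys := ((PySem.List.enumerate l2).filter (fun p => decide (∃ x ∈ s1, x ∈ p.2))).map (·.1) with hys
  have hpw : ys.Pairwise (fun a b => a < b) := by
    refine List.Pairwise.map _ (fun a b h => h) ?_
    exact List.Pairwise.filter _ (PySem.List.pairwise_lt_enumerate l2 0)
  have hysnd : ys.Nodup := hpw.imp (fun h => ne_of_lt h)
  have hcnd : cand.Nodup := pv_nodup_cand _ _ _ (by simp [PySem.Set.empty])
  have hmem : ∀ j, j ∈ ys ↔ j ∈ cand := by
    intro j
    rw [hys, hcand, pv_mem_cand]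
    simp only [List.mem_map, List.mem_filter, decide_eq_true_eq, PySem.Dict.getD_empty,
      PySem.Set.empty, List.not_mem_nil, false_or, pv_mem_index]
    constructor
    · rintro ⟨p, ⟨hp, x, hx1, hx2⟩, rfl⟩
      exact ⟨x, hx1, p, hp, hx2, rfl⟩
    · rintro ⟨x, hx1, p, hp, hx2, rfl⟩
      exact ⟨p, ⟨hp, x, hx1, hx2⟩, rfl⟩
  have hperm : ys.Perm cand := (List.perm_ext_iff_of_nodup hysnd hcnd).mpr hmem
  have hsorted : PySem.List.sorted cand (fun j => j) false = ys :=
    PySem.List.sorted_eq_of_perm_of_pairwise_lt cand ys (fun j => j) hperm hpw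
  rw [hsorted, hys, List.map_map]
  have hmapc : ((PySem.List.enumerate l2).filter (fun p => decide (∃ x ∈ s1, x ∈ p.2))).map
        ((fun j => (s1, PySem.List.pyGetD l2 j [])) ∘ (·.1))
      = ((PySem.List.enumerate l2).filter (fun p => decide (∃ x ∈ s1, x ∈ p.2))).map
        (fun p => (s1, p.2)) := by
    apply List.map_congr_left
    intro p hp
    rcases (PySem.List.mem_enumerate_iff l2 0 p).mp (List.mem_of_mem_filter hp) with ⟨k, hk, rfl⟩
    simp [PySem.List.pyGetD_natCast, List.getElem?_eq_getElem hk]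
  rw [hmapc]
  have hfilter : (l2.filter (fun s2 => decide (0 < PySem.Set.len (PySem.Set.inter s1 s2))))
      = (l2.filter (fun s2 => decide (∃ x ∈ s1, x ∈ s2))) := by
    apply List.filter_congr
    intro s2 _
    simp only [decide_eq_decide]
    exact pv_inter_pos s1 s2
  rw [hfilter]
  have h1 : ((PySem.List.enumerate l2).filter (fun p => decide (∃ x ∈ s1, x ∈ p.2))).map (·.2)
      = l2.filter (fun s2 => decide (∃ x ∈ s1, x ∈ s2)) := by
    have h2 := List.filter_map (f := fun x : Int × List Int => x.2)
      (p := fun s2 => decide (∃ x ∈ s1, x ∈ s2)) (l := PySem.List.enumerate l2 0)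
    rw [PySem.List.map_snd_enumerate] at h2
    exact h2.symm
  rw [← h1, List.map_map]
  rfl

-- ===== VERDICT (by name: the statement is the Claim_ definition above) =====
theorem find_matching_pairs_py_spec : Claim_equal_find_matching_pairs_py := by
  intro l1 l2 _
  unfold Spec_find_matching_pairs_py
  have hA : find_matching_pairs_py l1 l2
      = l1.foldl (fun acc s1 =>
          acc ++ (l2.filter (fun s2 => decide (0 < PySem.Set.len (PySem.Set.inter s1 s2)))).map
            (fun s2 => (s1, s2))) [] := by
    unfold find_matching_pairs_py
    exact PySem.List.foldl_congr_mem _ _ _ _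
      (fun acc s1 _ => PySem.List.foldl_append_ite _ _ l2 acc)
  have hB : find_matching_pairs_py_alt l1 l2
      = l1.foldl (fun acc s1 =>
          acc ++ (PySem.List.sorted
            (s1.foldl (fun c x => PySem.Set.update c
              (((PySem.List.enumerate l2).foldl (fun d p =>
                  p.2.foldl (fun d y => d.modify y [] (· ++ [p.1])) d) PySem.Dict.empty).getD x []))
              PySem.Set.empty) (fun j => j) false).map
            (fun j => (s1, PySem.List.pyGetD l2 j []))) [] := rfl
  rw [hA, hB]
  exact PySem.List.foldl_congr_mem _ _ _ []
    (fun acc s1 _ => by rw [pv_row_eq l2 s1])
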